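-- pv_equiv track=rewrite | github.com/MelonFaceDOOM/wmvi | scripts/sample_prod_to_test.py | _align_rows_to_columns
-- ===== SOURCE A (Python) =====
-- from typing import Any, Iterable, Sequence
--
-- def _align_rows_to_columns(
--     rows: list[tuple[Any, ...]],
--     src_columns: list[str],
--     dst_columns: list[str],
-- ) -> tuple[list[str], list[tuple[Any, ...]]]:
--     if not rows:
--         return [], []
--     src_idx = {c: i for i, c in enumerate(src_columns)}
--     aligned_cols = [c for c in dst_columns if c in src_idx]
--     aligned_rows: list[tuple[Any, ...]] = []
--     for r in rows:
--         aligned_rows.append(tuple(r[src_idx[c]] for c in aligned_cols))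
--     return aligned_cols, aligned_rows
-- ===== SOURCE B (Python) =====
-- def _align_rows_to_columns(rows, src_columns, dst_columns):
--     if not rows:
--         return [], []
--     src_idx = {c: i for i, c in enumerate(src_columns)}
--     aligned_cols = [c for c in dst_columns if c in src_idx]
--     if not aligned_cols:
--         return aligned_cols, [() for _ in rows]
--     cols = list(zip(*rows))
--     selected = [cols[src_idx[c]] for c in aligned_cols]
--     aligned_rows = [tuple(x) for x in zip(*selected)]
--     return aligned_cols, aligned_rows
-- ===== Notes on version B (the rewrite author's own statement) =====
-- stated objective: alternative
-- what changed: B projects column-major: it transposes the rows once with zip(*rows), picks the matching columns out of the transpose, and zips them back into rows, instead of A's per-row generator indexing.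
import Mathlib
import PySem

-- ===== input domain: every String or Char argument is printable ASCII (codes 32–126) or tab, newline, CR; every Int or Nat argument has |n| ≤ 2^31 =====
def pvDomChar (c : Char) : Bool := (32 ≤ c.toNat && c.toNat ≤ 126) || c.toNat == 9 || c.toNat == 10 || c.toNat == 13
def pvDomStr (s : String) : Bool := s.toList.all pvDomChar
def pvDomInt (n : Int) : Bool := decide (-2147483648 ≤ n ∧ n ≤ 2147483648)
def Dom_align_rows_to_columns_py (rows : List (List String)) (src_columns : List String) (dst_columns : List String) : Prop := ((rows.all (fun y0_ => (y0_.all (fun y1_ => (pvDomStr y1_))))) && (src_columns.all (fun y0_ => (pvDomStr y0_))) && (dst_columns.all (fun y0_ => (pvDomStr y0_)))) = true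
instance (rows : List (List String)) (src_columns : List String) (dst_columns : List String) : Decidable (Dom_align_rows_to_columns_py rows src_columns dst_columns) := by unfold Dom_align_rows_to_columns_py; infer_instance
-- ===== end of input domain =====

-- B re-implements the projection column-major (transpose with zip, select columns, zip back)
-- instead of A's row-by-row generator indexing; same cost, different decomposition ("alternative").


-- ===== PORT A =====
def align_rows_to_columns_py (rows : List (List String)) (src_columns : List String) (dst_columns : List String) : List String × List (List String) :=
  if rows = [] then ([], [])
  else
    -- src_idx = {c: i for i, c in enumerate(src_columns)}
    let src_idx : PySem.Dict String Int :=
      (PySem.List.enumerate src_columns 0).foldl (fun d p => d.insert p.2 p.1) PySem.Dict.empty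
    -- aligned_cols = [c for c in dst_columns if c in src_idx]
    let aligned_cols := dst_columns.filter (fun c => src_idx.contains c)
    -- for r in rows: aligned_rows.append(tuple(r[src_idx[c]] for c in aligned_cols))
    -- r[src_idx[c]] via pyGetD: exact under Pre_ (the index is in range there)
    let aligned_rows := rows.foldl
      (fun acc r => acc ++ [aligned_cols.map (fun c => PySem.List.pyGetD r (src_idx.getD c 0) "")]) []
    (aligned_cols, aligned_rows)

-- ===== PORT B =====
-- exact model of Python's zip(*ls): truncates to the shortest list; within that range the
-- default d is never used (every index i is < every list's length).
def pyZip {α : Type} (d : α) (ls : List (List α)) : List (List α) :=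
  match ls with
  | [] => []
  | x :: xs =>
    (List.range (xs.foldl (fun m r => min m r.length) x.length)).map
      (fun i => (x :: xs).map (fun r => r.getD i d))

def align_rows_to_columns_py_alt (rows : List (List String)) (src_columns : List String) (dst_columns : List String) : List String × List (List String) :=
  if rows = [] then ([], [])
  else
    let src_idx : PySem.Dict String Int :=
      (PySem.List.enumerate src_columns 0).foldl (fun d p => d.insert p.2 p.1) PySem.Dict.empty
    let aligned_cols := dst_columns.filter (fun c => src_idx.contains c)
    if aligned_cols = [] then (aligned_cols, rows.map (fun _ => []))
    else
      -- cols = list(zip(*rows)); selected = [cols[src_idx[c]] for c in aligned_cols]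
      let cols := pyZip "" rows
      let selected := aligned_cols.map (fun c => PySem.List.pyGetD cols (src_idx.getD c 0) [])
      -- aligned_rows = [tuple(x) for x in zip(*selected)]
      (aligned_cols, pyZip "" selected)

-- ===== PRECONDITION & SPEC =====
-- last index of c in src (the value Python's dict comprehension keeps for duplicate columns)
def pvLastIdx (src : List String) (c : String) : Nat := src.length - 1 - src.reverse.idxOf c

-- Pre_ excludes exactly the inputs where A raises IndexError: some row too short for the
-- (last-occurrence) source index of a destination column that is present in src_columns.
def Pre_align_rows_to_columns_py (rows : List (List String)) (src_columns : List String) (dst_columns : List String) : Prop :=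
  ∀ r ∈ rows, ∀ c ∈ dst_columns, c ∈ src_columns → pvLastIdx src_columns c < r.length
instance (rows : List (List String)) (src_columns : List String) (dst_columns : List String) : Decidable (Pre_align_rows_to_columns_py rows src_columns dst_columns) := by unfold Pre_align_rows_to_columns_py; infer_instance

def pvWitness_align_rows_to_columns_py : List (List String) × List String × List String :=
  ([["1", "2"], ["3", "4"]], ["a", "b"], ["b", "z"])

def Spec_align_rows_to_columns_py (rows : List (List String)) (src_columns : List String) (dst_columns : List String) (out : List String × List (List String)) : Prop := out = align_rows_to_columns_py_alt rows src_columns dst_columns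
instance (rows : List (List String)) (src_columns : List String) (dst_columns : List String) (out : List String × List (List String)) : Decidable (Spec_align_rows_to_columns_py rows src_columns dst_columns out) := by unfold Spec_align_rows_to_columns_py; infer_instance

-- ===== CLAIM (what is proved, stated in full; the proofs are below) =====
def Claim_equal_align_rows_to_columns_py : Prop := ∀ (rows : List (List String)) (src_columns : List String) (dst_columns : List String), Dom_align_rows_to_columns_py rows src_columns dst_columns → Pre_align_rows_to_columns_py rows src_columns dst_columns → Spec_align_rows_to_columns_py rows src_columns dst_columns (align_rows_to_columns_py rows src_columns dst_columns)


-- ===== LEMMAS AND PROOFS =====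

-- the dict {c: i for i, c in enumerate(src)} maps c to its LAST index in src
theorem pv_dict_get? (src : List String) (c : String) :
    ((PySem.List.enumerate src 0).foldl (fun d p => d.insert p.2 p.1) PySem.Dict.empty).get? c
      = if c ∈ src then some ((pvLastIdx src c : Int)) else none := by
  induction src using List.reverseRecOn with
  | nil => simp [PySem.List.enumerate_nil, PySem.Dict.get?_empty]
  | append_singleton ys y ih =>
    rw [PySem.List.enumerate_append, List.foldl_append]
    simp only [PySem.List.enumerate_cons, PySem.List.enumerate_nil, List.foldl_cons, List.foldl_nil]
    rw [PySem.Dict.get?_insert, ih]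
    by_cases hcy : c = y
    · subst hcy
      simp [pvLastIdx]
    · have hmem : c ∈ ys ++ [y] ↔ c ∈ ys := by simp [hcy]
      by_cases hc : c ∈ ys
      · simp only [if_neg hcy, if_pos hc, if_pos (hmem.mpr hc)]
        congr 2
        have hlt : ys.reverse.idxOf c < ys.length := by
          rw [← List.length_reverse]
          exact List.idxOf_lt_length_of_mem (by simpa using hc)
        simp [pvLastIdx, List.reverse_append, Ne.symm hcy]
        omega
      · simp [hcy, hc, hmem]

theorem pv_dict_contains (src : List String) (c : String) :
    ((PySem.List.enumerate src 0).foldl (fun d p => d.insert p.2 p.1) PySem.Dict.empty).contains c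
      = decide (c ∈ src) := by
  rw [PySem.Dict.contains_eq_isSome_get?, pv_dict_get?]
  by_cases h : c ∈ src <;> simp [h]

theorem pv_dict_getD (src : List String) (c : String) (h : c ∈ src) :
    ((PySem.List.enumerate src 0).foldl (fun d p => d.insert p.2 p.1) PySem.Dict.empty).getD c 0
      = ((pvLastIdx src c : Int)) := by
  rw [PySem.Dict.getD_eq_get?_getD, pv_dict_get?]
  simp [h]

theorem pv_lt_foldl_min (k a : Nat) (ls : List (List String)) (ha : k < a)
    (h : ∀ r ∈ ls, k < r.length) : k < ls.foldl (fun m r => min m r.length) a := by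
  induction ls generalizing a with
  | nil => simpa using ha
  | cons x xs ih =>
    simp only [List.foldl_cons]
    exact ih _ (by simp [ha, h x (by simp)]) (fun r hr => h r (by simp [hr]))

theorem pv_foldl_min_const {α : Type} (n : Nat) (ls : List (List α))
    (h : ∀ r ∈ ls, r.length = n) : ls.foldl (fun m r => min m r.length) n = n := by
  induction ls with
  | nil => rfl
  | cons x xs ih =>
    simp only [List.foldl_cons, h x (by simp), min_self]
    exact ih (fun r hr => h r (by simp [hr]))

-- zipping back a NONEMPTY list of equal-length columns transposes exactly
theorem pv_pyZip_transpose {α β γ : Type} (d : α) (f : β → γ → α) (c0 : β) (cs : List β)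
    (rows : List γ) :
    pyZip d ((c0 :: cs).map (fun c => rows.map (f c)))
      = rows.map (fun r => (c0 :: cs).map (fun c => f c r)) := by
  rw [List.map_cons]
  simp only [pyZip]
  have hm : (cs.map (fun c => rows.map (f c))).foldl (fun m r => min m r.length)
      (rows.map (f c0)).length = rows.length := by
    rw [List.length_map]
    apply pv_foldl_min_const
    intro r hr
    obtain ⟨c, _, rfl⟩ := List.mem_map.mp hr
    simp
  rw [hm]
  apply List.ext_getElem (by simp)
  intro j h1 h2
  simp only [List.getElem_map, List.getElem_range, List.map_cons, List.map_map]
  have hj : j < rows.length := by simpa using h1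
  congr 1
  · rw [List.getD_eq_getElem _ _ (by simpa using hj), List.getElem_map]
  · apply List.map_congr_left
    intro c _
    simp only [Function.comp]
    rw [List.getD_eq_getElem _ _ (by simpa using hj), List.getElem_map]

-- ===== VERDICT (by name: the statement is the Claim_ definition above) =====
theorem align_rows_to_columns_py_spec : Claim_equal_align_rows_to_columns_py := by
  intro rows src dst _hdom hpre
  unfold Spec_align_rows_to_columns_py align_rows_to_columns_py align_rows_to_columns_py_alt
  by_cases hrows : rows = []
  · simp [hrows]
  · rw [if_neg hrows, if_neg hrows]
    obtain ⟨x, xs, rfl⟩ := List.exists_cons_of_ne_nil hrows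
    simp only []
    set D := (PySem.List.enumerate src 0).foldl (fun d p => d.insert p.2 p.1) PySem.Dict.empty with hD
    set ac := dst.filter (fun c => D.contains c) with hac
    have hmem : ∀ c ∈ ac, c ∈ dst ∧ c ∈ src := by
      intro c hc
      rw [hac, List.mem_filter] at hc
      refine ⟨hc.1, ?_⟩
      have := hc.2
      rw [hD, pv_dict_contains] at this
      exact of_decide_eq_true this
    have hgetD : ∀ c ∈ ac, D.getD c 0 = ((pvLastIdx src c : Int)) := fun c hc => by
      rw [hD]; exact pv_dict_getD src c (hmem c hc).2
    have hidx : ∀ c ∈ ac, ∀ r ∈ x :: xs, pvLastIdx src c < r.length := by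
      intro c hc r hr
      exact hpre r hr c (hmem c hc).1 (hmem c hc).2
    clear_value D ac
    rw [PySem.List.foldl_append_singleton_eq_map]
    simp only [List.nil_append]
    by_cases hac0 : ac = []
    · simp [hac0]
    · rw [if_neg hac0]
      refine Prod.ext rfl ?_
      have hcols : ∀ c ∈ ac, PySem.List.pyGetD (pyZip "" (x :: xs)) (D.getD c 0) []
          = (x :: xs).map (fun r => r.getD (pvLastIdx src c) "") := by
        intro c hc
        rw [hgetD c hc, PySem.List.pyGetD_natCast]
        simp only [pyZip]
        have hlt : pvLastIdx src c < xs.foldl (fun m r => min m r.length) x.length :=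
          pv_lt_foldl_min _ _ _ (hidx c hc x (by simp)) (fun r hr => hidx c hc r (by simp [hr]))
        rw [List.getD_eq_getElem _ _ (by simpa using hlt)]
        simp
      rw [List.map_congr_left hcols]
      obtain ⟨c0, cs, rfl⟩ := List.exists_cons_of_ne_nil hac0
      rw [pv_pyZip_transpose]
      apply List.map_congr_left
      intro r _
      apply List.map_congr_left
      intro c hc
      rw [hgetD c hc, PySem.List.pyGetD_natCast]
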